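-- pv_equiv track=rewrite | github.com/abhatta3/PEV_Proteogenomics | codes/Rescore.py | fmod
-- ===== SOURCE A (Python) =====
-- def fmod(seq,itq):
--     if itq==0:
--         val=''
--     elif itq==4:
--         val='+144'
--     elif itq==8:
--         val='+304'
--
--     for l in seq:
--         if l=="C":
--             val=val+l+'+57'
--         elif itq==4 and l=="K":
--             val=val+l+'+144'
--         elif itq==8 and l=="K":
--             val=val+l+'+304'
--         else:
--             val=val+l
--     return val
-- ===== SOURCE B (Python) =====
-- def fmod(seq, itq):
--     if itq == 0:
--         prefix = ''
--     elif itq == 4: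
--         prefix = '+144'
--     elif itq == 8:
--         prefix = '+304'
--     s = seq.replace('C', 'C+57')
--     if itq == 4:
--         s = s.replace('K', 'K+144')
--     elif itq == 8:
--         s = s.replace('K', 'K+304')
--     return prefix + s
-- ===== Notes on version B (the rewrite author's own statement) =====
-- stated objective: idiomatic
-- what changed: replaces the per-character accumulator loop with whole-string str.replace substitution passes (C->C+57, then K->K+144/K+304 depending on itq), which commute because the substitutions are independent
import Mathlib
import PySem

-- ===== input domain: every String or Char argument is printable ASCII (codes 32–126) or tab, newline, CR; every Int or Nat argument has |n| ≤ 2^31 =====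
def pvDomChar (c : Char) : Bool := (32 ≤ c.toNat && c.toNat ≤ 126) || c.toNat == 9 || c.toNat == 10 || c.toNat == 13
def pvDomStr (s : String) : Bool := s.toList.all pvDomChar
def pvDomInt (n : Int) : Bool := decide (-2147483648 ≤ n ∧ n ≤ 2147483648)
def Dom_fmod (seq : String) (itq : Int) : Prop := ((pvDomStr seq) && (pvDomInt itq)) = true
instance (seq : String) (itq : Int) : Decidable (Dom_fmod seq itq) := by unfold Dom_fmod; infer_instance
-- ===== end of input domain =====

-- B replaces A's per-character accumulator loop with whole-string replace passes (idiomatic; not claimed faster).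

-- ===== PORT A =====
-- A builds the result one character at a time, appending to `val` (initialised by the if/elif on itq).
def fmod (seq : String) (itq : Int) : String :=
  let init : List Char :=
    if itq = 0 then []
    else if itq = 4 then "+144".toList
    else if itq = 8 then "+304".toList
    else []  -- in Python `val` is unbound here and the loop/return raises UnboundLocalError: excluded by Pre_
  String.ofList (seq.toList.foldl (fun val l =>
    if l = 'C' then val ++ [l] ++ "+57".toList
    else if itq = 4 ∧ l = 'K' then val ++ [l] ++ "+144".toList
    else if itq = 8 ∧ l = 'K' then val ++ [l] ++ "+304".toList
    else val ++ [l]) init)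

-- ===== PORT B =====
-- B: prefix via the same if/elif, then whole-string replace passes (str.replace = PySem.Chars.replace on .toList).
def fmod_alt (seq : String) (itq : Int) : String :=
  let pre : List Char :=
    if itq = 0 then []
    else if itq = 4 then "+144".toList
    else if itq = 8 then "+304".toList
    else []  -- Python raises UnboundLocalError here: excluded by Pre_
  let s := PySem.Chars.replace seq.toList "C".toList "C+57".toList
  let s :=
    if itq = 4 then PySem.Chars.replace s "K".toList "K+144".toList
    else if itq = 8 then PySem.Chars.replace s "K".toList "K+304".toList
    else s
  String.ofList (pre ++ s)

-- ===== PRECONDITION & SPEC =====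
-- A assigns `val` only for itq ∈ {0,4,8}; any other itq raises UnboundLocalError (even for empty seq, at `return val`).
def Pre_fmod (seq : String) (itq : Int) : Prop := itq = 0 ∨ itq = 4 ∨ itq = 8
instance (seq : String) (itq : Int) : Decidable (Pre_fmod seq itq) := by unfold Pre_fmod; infer_instance
def pvWitness_fmod : String × Int := ("ACKC", 4)

def Spec_fmod (seq : String) (itq : Int) (out : String) : Prop := out = fmod_alt seq itq
instance (seq : String) (itq : Int) (out : String) : Decidable (Spec_fmod seq itq out) := by unfold Spec_fmod; infer_instance

-- ===== CLAIM (what is proved, stated in full; the proofs are below) =====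
def Claim_equal_fmod : Prop := ∀ (seq : String) (itq : Int), Dom_fmod seq itq → Pre_fmod seq itq → Spec_fmod seq itq (fmod seq itq)

-- ===== LEMMAS AND PROOFS =====

-- single-character replace is a per-character expansion
theorem replace_go_single (c : Char) (new : List Char) : ∀ (l : List Char) (fuel : Nat) (acc : List Char), l.length ≤ fuel →
    PySem.Chars.replace.go [c] new fuel l acc = acc.reverse ++ l.flatMap (fun x => if x = c then new else [x]) := by
  intro l
  induction l with
  | nil => intro fuel acc h; cases fuel <;> simp [PySem.Chars.replace.go]
  | cons x t ih =>
    intro fuel acc h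
    cases fuel with
    | zero => simp at h
    | succ f =>
      simp only [PySem.Chars.replace.go]
      by_cases hx : x = c
      · simp [List.isPrefixOf, hx, ih f (new.reverse ++ acc) (by simpa using h)]
      · simp [List.isPrefixOf, Ne.symm hx, hx, ih f (x :: acc) (by simpa using h)]

theorem replace_single (c : Char) (new s : List Char) :
    PySem.Chars.replace s [c] new = s.flatMap (fun x => if x = c then new else [x]) := by
  simp [PySem.Chars.replace, replace_go_single c new s s.length [] le_rfl]

-- A's loop as a flatMap
theorem fmod_loop_eq (itq : Int) (init : List Char) (cs : List Char) :
    cs.foldl (fun val l =>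
      if l = 'C' then val ++ [l] ++ "+57".toList
      else if itq = 4 ∧ l = 'K' then val ++ [l] ++ "+144".toList
      else if itq = 8 ∧ l = 'K' then val ++ [l] ++ "+304".toList
      else val ++ [l]) init
    = init ++ cs.flatMap (fun l =>
      if l = 'C' then l :: "+57".toList
      else if itq = 4 ∧ l = 'K' then l :: "+144".toList
      else if itq = 8 ∧ l = 'K' then l :: "+304".toList
      else [l]) := by
  have hfun : (fun (val : List Char) (l : Char) =>
      if l = 'C' then val ++ [l] ++ "+57".toList
      else if itq = 4 ∧ l = 'K' then val ++ [l] ++ "+144".toList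
      else if itq = 8 ∧ l = 'K' then val ++ [l] ++ "+304".toList
      else val ++ [l])
      = (fun val l => val ++ (if l = 'C' then l :: "+57".toList
        else if itq = 4 ∧ l = 'K' then l :: "+144".toList
        else if itq = 8 ∧ l = 'K' then l :: "+304".toList
        else [l])) := by
    funext v l; split_ifs <;> simp
  rw [hfun, PySem.List.foldl_append_eq_flatMap]

theorem fmod_spec : Claim_equal_fmod := by
  intro seq itq _ hpre
  simp only [Spec_fmod, fmod, fmod_alt]
  rw [fmod_loop_eq]
  have hC : ("C" : String).toList = ['C'] := rfl
  have hK : ("K" : String).toList = ['K'] := rfl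
  rcases hpre with h | h | h <;> subst h <;>
    simp only [hC, hK, replace_single, List.flatMap_assoc] <;> norm_num <;>
  · refine congrArg String.ofList ?_
    try refine congrArg₂ HAppend.hAppend rfl ?_
    try simp only [List.flatMap_assoc]
    apply List.flatMap_congr
    intro x _
    by_cases hx : x = 'C' <;> by_cases hk : x = 'K' <;> simp_all
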